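-- pv_equiv track=rewrite | github.com/remyhuang03/sja-v3 | dev/ascii_and_zh.py | ascii_to_zh
-- ===== SOURCE A (Python) =====
-- from string import ascii_lowercase, digits
--
-- AVAILABLE_CHARS = ascii_lowercase + digits + ' ":[]{},.-_'
--
-- def ascii_to_zh(text):
--     #chinese_chars = [
--      #   chr(code) for code in range(0x4E00, 0x9FA5)
--     #]  # 使用包含更多中文字符的Unicode字符集
--
--     result = ""
--     for i in range(0, len(text), 10):
--         weight = 0
--         sum = 0
--         group = text[i : i + 10]
--         for c in group:
--             sum += AVAILABLE_CHARS.index(c) * pow(114, weight)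
--             weight += 1
--
--         result += chr(sum+0x4E00)
--
--     return result
-- ===== SOURCE B (Python) =====
-- from string import ascii_lowercase, digits
--
-- AVAILABLE_CHARS = ascii_lowercase + digits + ' ":[]{},.-_'
--
-- def ascii_to_zh(text):
--     out = []
--     while text:
--         group, text = text[:10], text[10:]
--         v = 0
--         for c in reversed(group):
--             v = v * 114 + AVAILABLE_CHARS.index(c)
--         out.append(chr(v + 0x4E00))
--     return "".join(out)
-- ===== Notes on version B (the rewrite author's own statement) =====
-- stated objective: simpler
-- what changed: B replaces A's weight counter plus pow(114, weight) per character with a single Horner accumulation over the reversed 10-char group, and consumes the text by peeling text[:10]/text[10:] slices in a while loop instead of stepping indices with range(0, len, 10).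
import Mathlib
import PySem

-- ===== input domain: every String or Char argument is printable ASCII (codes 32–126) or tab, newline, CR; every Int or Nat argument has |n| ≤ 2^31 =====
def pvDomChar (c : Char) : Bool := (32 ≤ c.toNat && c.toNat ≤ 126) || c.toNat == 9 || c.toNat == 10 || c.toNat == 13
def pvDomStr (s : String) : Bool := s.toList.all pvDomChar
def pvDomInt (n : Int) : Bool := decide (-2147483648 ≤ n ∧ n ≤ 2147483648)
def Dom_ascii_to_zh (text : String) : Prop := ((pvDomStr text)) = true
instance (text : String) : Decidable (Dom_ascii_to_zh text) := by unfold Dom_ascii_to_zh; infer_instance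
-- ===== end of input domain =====

-- B replaces A's weight counter + pow() with a reversed-traversal Horner accumulation and
-- consumes the text by slicing chunks off the front instead of stepping indices (objective: simpler).

-- AVAILABLE_CHARS = ascii_lowercase + digits + ' ":[]{},.-_'  (shared module-level constant)
-- ascii_lowercase + digits + ' ":[]{},.-_' written out as a char list
def availChars : List Char := ['a', 'b', 'c', 'd', 'e', 'f', 'g', 'h', 'i', 'j', 'k', 'l', 'm', 'n', 'o', 'p', 'q', 'r', 's', 't', 'u', 'v', 'w', 'x', 'y', 'z', '0', '1', '2', '3', '4', '5', '6', '7', '8', '9', ' ', '\"', ':', '[', ']', '{', '}', ',', '.', '-', '_']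

-- ===== PORT A =====
def ascii_to_zh (text : String) : String :=
  let cs := text.toList
  String.ofList ((PySem.List.pyRange 0 (cs.length : Int) 10).foldl (fun result i =>
      let group := PySem.List.slice cs (some i) (some (i + 10))
      let ws := group.foldl (fun (st : Nat × Int) c =>
          (st.1 + 1, st.2 + ((PySem.List.index? availChars c).getD 0 : Int) * 114 ^ st.1)) (0, 0)
      result ++ [Char.ofNat (ws.2 + 0x4E00).toNat]) [])

-- ===== PORT B =====
-- B's while loop, peeling text[:10] / text[10:] and doing a reversed Horner accumulation.
def altChunks (cs : List Char) : List Char :=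
  if h : cs = [] then []
  else
    let group := PySem.List.slice cs none (some 10)
    let rest := PySem.List.slice cs (some 10) none
    let v := group.reverse.foldl
        (fun v c => v * 114 + ((PySem.List.index? availChars c).getD 0 : Int)) 0
    Char.ofNat (v + 0x4E00).toNat :: altChunks rest
termination_by cs.length
decreasing_by
  rw [PySem.List.slice_from _ (by norm_num : (0:Int) ≤ 10)]
  have hne : cs.length ≠ 0 := fun hh => h (List.eq_nil_of_length_eq_zero hh)
  norm_num
  omega

def ascii_to_zh_alt (text : String) : String :=
  String.ofList (altChunks text.toList)

-- ===== PRECONDITION & SPEC =====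
-- base-114 little-endian value of a group (a foldr formula used only to state the precondition)
def pvVal114 (g : List Char) : Int :=
  g.foldr (fun c v => ((PySem.List.index? availChars c).getD 0 : Int) + 114 * v) 0

-- Pre_ excludes exactly the inputs on which Python A raises: a character outside
-- AVAILABLE_CHARS (.index ValueError) or a 10-char group whose base-114 value pushes
-- chr past 0x10FFFF (ValueError/OverflowError). (Surrogate codepoints are unreachable:
-- the largest in-range group value is 623074 - 0x4E00, below 0xD800 needs a third digit
-- of 3, which already overshoots 0xDFFF.)
def Pre_ascii_to_zh (text : String) : Prop :=
  (text.toList.all (fun c => availChars.contains c)) = true ∧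
  ((List.range ((text.toList.length + 9) / 10)).all
      (fun k => pvVal114 ((text.toList.drop (10 * k)).take 10) + 0x4E00 ≤ 0x10FFFF)) = true
instance (text : String) : Decidable (Pre_ascii_to_zh text) := by
  unfold Pre_ascii_to_zh; infer_instance

def pvWitness_ascii_to_zh : String := "abc"

def Spec_ascii_to_zh (text : String) (out : String) : Prop := out = ascii_to_zh_alt text
instance (text : String) (out : String) : Decidable (Spec_ascii_to_zh text out) := by unfold Spec_ascii_to_zh; infer_instance

-- ===== CLAIM (what is proved, stated in full; the proofs are below) =====
def Claim_equal_ascii_to_zh : Prop := ∀ (text : String), Dom_ascii_to_zh text → Pre_ascii_to_zh text → Spec_ascii_to_zh text (ascii_to_zh text)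

-- ===== LEMMAS AND PROOFS =====

-- index of c in AVAILABLE_CHARS, as both ports read it
def pvIdx (c : Char) : Int := ((PySem.List.index? availChars c).getD 0 : Int)

-- B's Horner value of a group
def pvHorner (g : List Char) : Int :=
  g.reverse.foldl (fun v c => v * 114 + pvIdx c) 0

-- character a group is encoded to (B's expression)
def pvEnc (g : List Char) : Char := Char.ofNat (pvHorner g + 0x4E00).toNat

lemma pvHorner_eq_foldr (g : List Char) :
    pvHorner g = g.foldr (fun c v => v * 114 + pvIdx c) 0 := by
  simp [pvHorner, List.foldl_reverse]

-- A's inner loop (weight counter + powers) computes the Horner value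
lemma pvHorner_cons (c : Char) (t : List Char) :
    pvHorner (c :: t) = pvHorner t * 114 + pvIdx c := by
  simp [pvHorner_eq_foldr]

lemma innerA_eq (g : List Char) : ∀ (w : Nat) (s : Int),
    (g.foldl (fun (st : Nat × Int) c =>
        (st.1 + 1, st.2 + ((PySem.List.index? availChars c).getD 0 : Int) * 114 ^ st.1)) (w, s)).2
      = s + 114 ^ w * pvHorner g := by
  induction g with
  | nil => intro w s; simp [pvHorner]
  | cons c t ih =>
      intro w s
      simp only [List.foldl_cons]
      rw [ih, pvHorner_cons]
      simp only [pvIdx]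
      ring

lemma altChunks_nil : altChunks [] = [] := by
  unfold altChunks; simp

lemma altChunks_cons (cs : List Char) (h : cs ≠ []) :
    altChunks cs = pvEnc (cs.take 10) :: altChunks (cs.drop 10) := by
  conv_lhs => unfold altChunks
  simp [h, pvEnc, pvHorner, pvIdx,
    PySem.List.slice_to _ (by norm_num : (0:Int) ≤ 10),
    PySem.List.slice_from _ (by norm_num : (0:Int) ≤ 10)]

-- A's outer fold over range(0, len, 10), re-indexed to chunks, equals B's chunk recursion
lemma chunkFold (N : Nat) (l : List Char) (acc : List Char)
    (hN : N = (l.length + 9) / 10) :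
    (List.range N).foldl (fun res k => res ++ [pvEnc ((l.drop (10 * k)).take 10)]) acc
      = acc ++ altChunks l := by
  induction N generalizing l acc with
  | zero =>
      have hl : l = [] := by
        cases l with
        | nil => rfl
        | cons a t => simp at hN; omega
      simp [hl, altChunks_nil]
  | succ m ih =>
      have hl : l ≠ [] := by
        intro h; subst h; simp at hN
      rw [List.range_succ_eq_map]
      simp only [List.foldl_cons, List.foldl_map]
      have hstep : (fun (res : List Char) (k : Nat) =>
            res ++ [pvEnc ((l.drop (10 * (k + 1))).take 10)])
          = fun res k => res ++ [pvEnc (((l.drop 10).drop (10 * k)).take 10)] := by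
        funext res k
        rw [List.drop_drop]
        ring_nf
      have hm : m = ((l.drop 10).length + 9) / 10 := by
        have := List.length_pos_iff.mpr hl
        simp only [List.length_drop]
        omega
      simp only [Nat.succ_eq_add_one, hstep]
      rw [ih ((l.drop 10)) _ hm]
      rw [altChunks_cons l hl]
      simp
theorem ascii_to_zh_eq_alt (text : String) : ascii_to_zh text = ascii_to_zh_alt text := by
  unfold ascii_to_zh ascii_to_zh_alt
  apply congrArg String.ofList
  set cs := text.toList with hcs
  rw [PySem.List.pyRange_of_pos 0 (cs.length : Int) (by norm_num : (0:Int) < 10)]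
  rw [List.foldl_map]
  have hif : (if (0:Int) < (cs.length : Int)
        then ((((cs.length : Int)) - 0 + 10 - 1) / 10).toNat else 0)
      = (cs.length + 9) / 10 := by
    split_ifs with h
    · omega
    · omega
  rw [hif]
  have hstep : (fun (result : List Char) (k : Nat) =>
        let group := PySem.List.slice cs (some (0 + 10 * (k : Int))) (some (0 + 10 * (k : Int) + 10))
        let ws := group.foldl (fun (st : Nat × Int) c =>
            (st.1 + 1, st.2 + ((PySem.List.index? availChars c).getD 0 : Int) * 114 ^ st.1)) (0, 0)
        result ++ [Char.ofNat (ws.2 + 0x4E00).toNat])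
      = fun res k => res ++ [pvEnc ((cs.drop (10 * k)).take 10)] := by
    funext res k
    have hb : ((0 : Int) + 10 * (k : Int)) = ((10 * k : Nat) : Int) := by push_cast; ring
    have hb2 : ((0 : Int) + 10 * (k : Int) + 10) = ((10 * k : Nat) : Int) + ((10 : Nat) : Int) := by
      push_cast; ring
    rw [hb]
    have hb2' : (((10 * k : Nat)) : Int) + 10 = ((10 * k : Nat) : Int) + ((10 : Nat) : Int) := by
      norm_num
    rw [hb2', PySem.List.slice_natCast_add]
    simp only [innerA_eq]
    simp [pvEnc]
  rw [hstep]
  exact chunkFold _ cs [] rfl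

-- ===== VERDICT (by name: the statement is the Claim_ definition above) =====
theorem ascii_to_zh_spec : Claim_equal_ascii_to_zh := by
  intro text _ _
  unfold Spec_ascii_to_zh
  exact ascii_to_zh_eq_alt text
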